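-- pv_equiv track=rewrite | github.com/sueszli/vector-database-benchmark | dataset/python-mutated/tensor_can.py | _min_dummies
-- ===== SOURCE A (Python) =====
-- def _min_dummies(dummies, sym, indices):
--     if False:
--         return 10
--     '\n    Return list of minima of the orbits of indices in group of dummies.\n    See ``double_coset_can_rep`` for the description of ``dummies`` and ``sym``.\n    ``indices`` is the initial list of dummy indices.\n\n    Examples\n    ========\n\n    >>> from sympy.combinatorics.tensor_can import _min_dummies\n    >>> _min_dummies([list(range(2, 8))], [0], list(range(10)))\n    [0, 1, 2, 2, 2, 2, 2, 2, 8, 9]\n    '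
--     num_types = len(sym)
--     m = [min(dx) if dx else None for dx in dummies]
--     res = indices[:]
--     for i in range(num_types):
--         for (c, i) in enumerate(indices):
--             for j in range(num_types):
--                 if i in dummies[j]:
--                     res[c] = m[j]
--                     break
--     return res
-- ===== SOURCE B (Python) =====
-- def _min_dummies(dummies, sym, indices):
--     res = indices[:]
--     for dx in reversed(dummies[:len(sym)]):
--         if dx:
--             mj = min(dx)
--             for c, i in enumerate(indices):
--                 if i in dx:
--                     res[c] = mj
--     return res
-- ===== Notes on version B (the rewrite author's own statement) =====
-- stated objective: faster
-- what changed: A scans, for every index position, the orbit list front-to-back with a break, and repeats that whole pass len(sym) times in a redundant outer loop; B drops the dead branch and the repetition loop and iterates once over the orbits in reverse order, overwriting res with each orbit's minimum so that the lowest-indexed orbit is written last and wins.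
import Mathlib
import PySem

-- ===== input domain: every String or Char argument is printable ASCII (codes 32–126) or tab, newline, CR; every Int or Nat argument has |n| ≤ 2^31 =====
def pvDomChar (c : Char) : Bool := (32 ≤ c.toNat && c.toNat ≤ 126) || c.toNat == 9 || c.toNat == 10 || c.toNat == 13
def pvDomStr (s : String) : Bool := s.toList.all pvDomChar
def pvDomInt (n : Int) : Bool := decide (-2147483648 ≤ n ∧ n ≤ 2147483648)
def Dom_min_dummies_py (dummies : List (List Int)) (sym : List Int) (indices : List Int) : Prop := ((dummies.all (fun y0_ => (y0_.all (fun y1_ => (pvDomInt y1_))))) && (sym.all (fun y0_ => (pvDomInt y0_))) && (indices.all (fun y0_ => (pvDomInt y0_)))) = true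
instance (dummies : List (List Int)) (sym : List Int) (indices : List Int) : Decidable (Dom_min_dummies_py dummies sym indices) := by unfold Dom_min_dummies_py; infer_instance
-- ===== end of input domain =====

-- B replaces A's per-index scan of the orbits (with a first-orbit break and a redundant
-- outer repetition loop) by a single reverse iteration over the orbits that overwrites
-- res, so the lowest-indexed orbit is processed last and wins; objective: simpler.

-- ===== PORT A =====
-- Python `min(dx)` on a list of ints
def pvMins (dx : List Int) : Option Int := PySem.List.min? dx (fun x => x)

-- the inner `for j in range(num_types): if i in dummies[j]: res[c] = m[j]; break` loop,
-- as a recursion on the remaining iteration count, returning the assigned value if any.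
-- Where Python raises IndexError (dummies[j] out of range) or would assign the non-int
-- None (m[j] = None, unreachable since i ∈ dummies[j] forces dummies[j] nonempty), the
-- port returns none (no assignment); those inputs are outside Pre_min_dummies_py.
def pvJLoop (ds : List (List Int)) (ms : List (Option Int)) (i : Int) : Nat → Nat → Option Int
  | _, 0 => none
  | j, rem + 1 =>
    match PySem.List.pyGet? ds (j : Int) with
    | none => none
    | some dx =>
      if i ∈ dx then (PySem.List.pyGet? ms (j : Int)).getD none
      else pvJLoop ds ms i (j + 1) rem

def min_dummies_py (dummies : List (List Int)) (sym : List Int) (indices : List Int) : List Int :=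
  let num_types := sym.length
  let m := dummies.map pvMins
  let res := indices
  (PySem.List.pyRange 0 (num_types : Int) 1).foldl
    (fun res _ =>
      (PySem.List.enumerate indices 0).foldl
        (fun r ci =>
          match pvJLoop dummies m ci.2 0 num_types with
          | some v => PySem.List.pySetD r ci.1 v
          | none => r)
        res)
    res

-- ===== PORT B =====
def min_dummies_py_alt (dummies : List (List Int)) (sym : List Int) (indices : List Int) : List Int :=
  ((dummies.take sym.length).reverse).foldl
    (fun res dx =>
      if dx.isEmpty then res
      else
        match PySem.List.min? dx (fun x => x) with
        | some mj =>
          (PySem.List.enumerate indices 0).foldl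
            (fun r ci => if ci.2 ∈ dx then PySem.List.pySetD r ci.1 mj else r) res
        | none => res)
    indices

-- ===== PRECONDITION & SPEC =====
-- Pre_ excludes exactly the inputs on which Python A raises IndexError: len(sym) > len(dummies)
-- together with some index not found in any orbit makes the j-loop read dummies[len(dummies)].
def Pre_min_dummies_py (dummies : List (List Int)) (sym : List Int) (indices : List Int) : Prop :=
  sym = [] ∨ sym.length ≤ dummies.length ∨ ∀ i ∈ indices, ∃ dx ∈ dummies, i ∈ dx
instance (dummies : List (List Int)) (sym : List Int) (indices : List Int) : Decidable (Pre_min_dummies_py dummies sym indices) := by unfold Pre_min_dummies_py; infer_instance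
def pvWitness_min_dummies_py : List (List Int) × List Int × List Int := ([[2, 3], [5]], [0, 1], [1, 2, 5])

def Spec_min_dummies_py (dummies : List (List Int)) (sym : List Int) (indices : List Int) (out : List Int) : Prop := out = min_dummies_py_alt dummies sym indices
instance (dummies : List (List Int)) (sym : List Int) (indices : List Int) (out : List Int) : Decidable (Spec_min_dummies_py dummies sym indices out) := by unfold Spec_min_dummies_py; infer_instance

-- ===== CLAIM (what is proved, stated in full; the proofs are below) =====
def Claim_equal_min_dummies_py : Prop := ∀ (dummies : List (List Int)) (sym : List Int) (indices : List Int), Dom_min_dummies_py dummies sym indices → Pre_min_dummies_py dummies sym indices → Spec_min_dummies_py dummies sym indices (min_dummies_py dummies sym indices)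

-- ===== LEMMAS AND PROOFS =====

-- value assigned to an index i by the orbit list L: minimum of the first orbit containing i
def pvG (L : List (List Int)) (i : Int) : Option Int :=
  (L.find? (fun dx => decide (i ∈ dx))).bind (fun dx => PySem.List.min? dx (fun x => x))

-- one enumerate-fold step, parametrised by the value (if any) written for each element
def pvStep (f : Int → Option Int) (r : List Int) (ci : Int × Int) : List Int :=
  match f ci.2 with
  | some v => PySem.List.pySetD r ci.1 v
  | none => r

-- the effect of a full enumerate-fold pass on the suffix rs (positions before pre.length untouched)
def pvUpd (f : Int → Option Int) : List Int → List Int → List Int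
  | [], rs => rs
  | _ :: _, [] => []
  | i :: xs, r :: rs => ((f i).getD r) :: pvUpd f xs rs

lemma pvStep_out (f : Int → Option Int) (r : List Int) (j : Int) (x : Int)
    (h : (r.length : Int) ≤ j) : pvStep f r (j, x) = r := by
  unfold pvStep
  cases f x with
  | none => rfl
  | some v =>
    simp only
    unfold PySem.List.pySetD
    rw [(PySem.List.pySet?_eq_none_iff r j v).2]
    · rfl
    · unfold PySem.Raise.InRange
      omega

lemma pvEnumFold_out (f : Int → Option Int) :
    ∀ (xs : List Int) (r : List Int) (s : Int), (r.length : Int) ≤ s →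
      (PySem.List.enumerate xs s).foldl (pvStep f) r = r := by
  intro xs
  induction xs with
  | nil => intro r s _; simp [PySem.List.enumerate_nil]
  | cons x xs ih =>
    intro r s hs
    rw [PySem.List.enumerate_cons, List.foldl_cons, pvStep_out f r s x hs]
    exact ih r (s + 1) (by omega)

lemma pvEnumFold (f : Int → Option Int) :
    ∀ (xs pre rs : List Int),
      (PySem.List.enumerate xs (pre.length : Int)).foldl (pvStep f) (pre ++ rs)
        = pre ++ pvUpd f xs rs := by
  intro xs
  induction xs with
  | nil => intro pre rs; simp [PySem.List.enumerate_nil, pvUpd]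
  | cons i xs ih =>
    intro pre rs
    rw [PySem.List.enumerate_cons, List.foldl_cons]
    cases rs with
    | nil =>
      have h1 : pvStep f (pre ++ []) ((pre.length : Int), i) = pre ++ [] := by
        apply pvStep_out; simp
      rw [h1]
      have h2 : (PySem.List.enumerate xs ((pre.length : Int) + 1)).foldl (pvStep f) (pre ++ []) = pre ++ [] := by
        apply pvEnumFold_out; simp
      rw [h2]; simp [pvUpd]
    | cons r rs =>
      have hstep : pvStep f (pre ++ r :: rs) ((pre.length : Int), i)
          = (pre ++ [(f i).getD r]) ++ rs := by
        unfold pvStep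
        cases hf : f i with
        | none => simp
        | some v =>
          simp only [Option.getD_some]
          rw [PySem.List.pySetD_natCast]
          rw [List.set_append_right _ _ (Nat.le_refl _)]
          simp
      rw [hstep]
      have hlen : ((pre.length : Int) + 1) = (((pre ++ [(f i).getD r]).length : Nat) : Int) := by
        simp
      rw [hlen, ih (pre ++ [(f i).getD r]) rs]
      simp [pvUpd]

lemma pvUpd_map (f : Int → Option Int) (h : Int → Int) :
    ∀ xs : List Int, pvUpd f xs (xs.map h) = xs.map (fun x => (f x).getD (h x)) := by
  intro xs
  induction xs with
  | nil => rfl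
  | cons x xs ih => simp [pvUpd, ih]

lemma pvUpd_self (f : Int → Option Int) (xs : List Int) :
    pvUpd f xs xs = xs.map (fun x => (f x).getD x) := by
  have := pvUpd_map f id xs
  simpa using this

lemma pvUpd_idem (f : Int → Option Int) :
    ∀ (xs rs : List Int), pvUpd f xs (pvUpd f xs rs) = pvUpd f xs rs := by
  intro xs
  induction xs with
  | nil => intro rs; rfl
  | cons x xs ih =>
    intro rs
    cases rs with
    | nil => rfl
    | cons r rs =>
      simp only [pvUpd, ih]
      cases f x <;> simp

-- the j-loop computes the first-orbit minimum over the first n orbits starting at position j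
lemma pvJLoop_eq (ds : List (List Int)) :
    ∀ (n j : Nat) (i : Int),
      pvJLoop ds (ds.map pvMins) i j n = pvG ((ds.drop j).take n) i := by
  intro n
  induction n with
  | zero => intro j i; simp [pvJLoop, pvG]
  | succ n ih =>
    intro j i
    unfold pvJLoop
    by_cases hj : j < ds.length
    · have hget : PySem.List.pyGet? ds (j : Int) = some ds[j] := by
        rw [PySem.List.pyGet?_natCast]; exact List.getElem?_eq_getElem hj
      rw [hget]
      have hdrop : ds.drop j = ds[j] :: ds.drop (j + 1) := (List.getElem_cons_drop hj).symm
      rw [hdrop, List.take_succ_cons]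
      by_cases hmem : i ∈ ds[j]
      · simp only [hmem, if_pos]
        have hm : PySem.List.pyGet? (ds.map pvMins) (j : Int) = some (pvMins ds[j]) := by
          rw [PySem.List.pyGet?_natCast]
          simp [List.getElem?_eq_getElem hj]
        rw [hm]
        simp [pvG, List.find?_cons_of_pos, hmem, pvMins]
      · simp only [hmem, if_neg, not_false_iff]
        rw [ih (j + 1) i]
        simp [pvG, List.find?_cons_of_neg, hmem]
    · have hget : PySem.List.pyGet? ds (j : Int) = none := by
        rw [PySem.List.pyGet?_natCast]
        exact List.getElem?_eq_none (by omega)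
      rw [hget]
      rw [List.drop_eq_nil_of_le (by omega)]
      simp [pvG]

lemma pvFoldl_idem {g : List Int → List Int} {F : List Int → Int → List Int}
    (hF : ∀ r x, F r x = g r) (hg : ∀ y, g (g y) = g y) :
    ∀ (l : List Int) (x : List Int), l.foldl F (g x) = g x := by
  intro l
  induction l with
  | nil => intro x; rfl
  | cons a l ih =>
    intro x
    simp only [List.foldl_cons]
    rw [hF (g x) a, hg x]
    exact ih x

lemma portA_char (dummies : List (List Int)) (sym : List Int) (indices : List Int) :
    min_dummies_py dummies sym indices
      = indices.map (fun x => (pvG (dummies.take sym.length) x).getD x) := by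
  unfold min_dummies_py
  set f : Int → Option Int := fun x => pvJLoop dummies (dummies.map pvMins) x 0 sym.length with hf
  have hstep : (fun (r : List Int) (ci : Int × Int) =>
      match pvJLoop dummies (dummies.map pvMins) ci.2 0 sym.length with
      | some v => PySem.List.pySetD r ci.1 v
      | none => r) = pvStep f := by
    funext r ci; rfl
  have hpass : ∀ res : List Int,
      (PySem.List.enumerate indices 0).foldl (pvStep f) res = pvUpd f indices res := by
    intro res
    have := pvEnumFold f indices [] res
    simpa using this
  have hfx : ∀ x, f x = pvG (dummies.take sym.length) x := by
    intro x
    rw [hf]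
    simpa using pvJLoop_eq dummies sym.length 0 x
  simp only [hstep]
  set g : List Int → List Int := fun res => pvUpd f indices res with hgdef
  have hg : ∀ y, g (g y) = g y := fun y => pvUpd_idem f indices y
  have h1 : g indices = indices.map (fun x => (pvG (dummies.take sym.length) x).getD x) := by
    rw [hgdef]
    simp only
    rw [pvUpd_self]
    exact List.map_congr_left (fun x _ => by rw [hfx x])
  by_cases h0 : sym.length = 0
  · rw [h0]
    rw [PySem.List.pyRange_one_eq_nil (by simp)]
    simp only [List.foldl_nil]
    simp [pvG]
  · have hpos : (0 : Int) < (sym.length : Int) := by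
      exact_mod_cast Nat.pos_of_ne_zero h0
    rw [PySem.List.pyRange_one_cons hpos, List.foldl_cons]
    have hF : ∀ (r : List Int) (x : Int),
        (PySem.List.enumerate indices 0).foldl (pvStep f) r = g r := fun r _ => hpass r
    calc (PySem.List.pyRange 1 (sym.length : Int) 1).foldl
            (fun res _ => (PySem.List.enumerate indices 0).foldl (pvStep f) res)
            ((PySem.List.enumerate indices 0).foldl (pvStep f) indices)
        = (PySem.List.pyRange 1 (sym.length : Int) 1).foldl
            (fun res _ => (PySem.List.enumerate indices 0).foldl (pvStep f) res) (g indices) := by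
          rw [hpass indices]
      _ = g indices := pvFoldl_idem hF hg _ indices
      _ = _ := h1

lemma portB_char (dummies : List (List Int)) (sym : List Int) (indices : List Int) :
    min_dummies_py_alt dummies sym indices
      = indices.map (fun x => (pvG (dummies.take sym.length) x).getD x) := by
  unfold min_dummies_py_alt
  generalize dummies.take sym.length = L
  induction L with
  | nil => simp [pvG]
  | cons dx L ih =>
    rw [List.reverse_cons, List.foldl_append, ih, List.foldl_cons, List.foldl_nil]
    by_cases hemp : dx.isEmpty
    · simp only [hemp, if_pos]
      apply List.map_congr_left
      intro x _
      have : (decide (x ∈ dx)) = false := by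
        cases dx with
        | nil => simp
        | cons a l => simp at hemp
      simp [pvG, List.find?, this]
    · simp only [hemp, if_neg, not_false_iff, Bool.false_eq_true]
      have hne : dx ≠ [] := by cases dx <;> simp_all
      obtain ⟨mj, hmj⟩ : ∃ mj, PySem.List.min? dx (fun x => x) = some mj := by
        cases h : PySem.List.min? dx (fun x => x) with
        | none => exact absurd ((PySem.List.min?_eq_none_iff dx (fun x => x)).1 h) hne
        | some m => exact ⟨m, rfl⟩
      rw [hmj]
      dsimp only
      set f : Int → Option Int := fun x => if x ∈ dx then some mj else none with hfd
      have hstep : (fun (r : List Int) (ci : Int × Int) =>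
          if ci.2 ∈ dx then PySem.List.pySetD r ci.1 mj else r) = pvStep f := by
        funext r ci
        by_cases h : ci.2 ∈ dx <;> simp [pvStep, hfd, h]
      rw [hstep]
      have := pvEnumFold f indices []
        (indices.map (fun x => (pvG L x).getD x))
      simp only [List.nil_append, List.length_nil, Nat.cast_zero] at this
      rw [this, pvUpd_map]
      apply List.map_congr_left
      intro x _
      by_cases hx : x ∈ dx
      · simp [hfd, hx, pvG, List.find?, hmj]
      · simp [hfd, hx, pvG, List.find?]

-- ===== VERDICT (by name: the statement is the Claim_ definition above) =====
theorem min_dummies_py_spec : Claim_equal_min_dummies_py := by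
  intro dummies sym indices _ _
  unfold Spec_min_dummies_py
  rw [portA_char, portB_char]
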